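-- pv_equiv track=rewrite | github.com/sydneyrenee/ASTDistance | python/ast_distance/ast_parser.py | text_has_stub_markers
-- ===== SOURCE A (Python) =====
-- def text_has_stub_markers(text: str) -> bool:
--     """Check if a string contains stub/TODO markers.
--
--     Faithful transliteration from ast_parser.hpp:559-593.
--     """
--     lower = text.lower()
--
--     def is_word(ch: str) -> bool:
--         return ch.isalnum() or ch == "_"
--
--     def has_word(word: str) -> bool:
--         pos = lower.find(word)
--         while pos != -1:
--             left_ok = pos == 0 or not is_word(lower[pos - 1])
--             end = pos + len(word)
--             right_ok = end >= len(lower) or not is_word(lower[end])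
--             if left_ok and right_ok:
--                 return True
--             pos = lower.find(word, pos + 1)
--         return False
--
--     return (
--         has_word("todo")
--         or has_word("stub")
--         or has_word("placeholder")
--         or has_word("fixme")
--         or "not yet implemented" in lower
--         or "not implemented" in lower
--         or has_word("unimplemented")
--         or has_word("notimplemented")
--     )
-- ===== SOURCE B (Python) =====
-- def text_has_stub_markers(text: str) -> bool:
--     """Single left-to-right position scan testing all word markers at once,
--     instead of one repeated find()+boundary loop per marker."""
--     lower = text.lower()
--     if "not yet implemented" in lower or "not implemented" in lower:
--         return True
--     n = len(lower)
--
--     def is_word(ch: str) -> bool: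
--         return ch.isalnum() or ch == "_"
--
--     markers = ("todo", "stub", "placeholder", "fixme", "unimplemented", "notimplemented")
--     for i in range(n):
--         if i > 0 and is_word(lower[i - 1]):
--             continue
--         for m in markers:
--             end = i + len(m)
--             if lower.startswith(m, i) and (end >= n or not is_word(lower[end])):
--                 return True
--     return False
-- ===== Notes on version B (the rewrite author's own statement) =====
-- stated objective: alternative
-- what changed: Replaces the per-marker repeated find()+boundary-retry loop (one scan per marker word) with a single left-to-right position scan that tests every marker at each word-boundary position, after the two phrase substring checks.
import Mathlib
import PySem

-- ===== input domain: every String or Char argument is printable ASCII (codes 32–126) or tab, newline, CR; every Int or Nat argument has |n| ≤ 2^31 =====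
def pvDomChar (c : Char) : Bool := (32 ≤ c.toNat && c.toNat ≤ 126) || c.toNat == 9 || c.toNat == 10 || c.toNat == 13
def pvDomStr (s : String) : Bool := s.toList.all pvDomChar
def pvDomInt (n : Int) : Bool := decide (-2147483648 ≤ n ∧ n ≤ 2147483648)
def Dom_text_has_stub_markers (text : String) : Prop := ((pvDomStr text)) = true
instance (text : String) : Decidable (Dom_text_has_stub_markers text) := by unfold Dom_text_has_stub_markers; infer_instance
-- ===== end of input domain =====

-- B is an alternative implementation: one left-to-right position scan testing all markers at
-- each word-boundary position, instead of A's repeated find()+boundary-retry loop per marker.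

-- char-level helper shared by both sources: is_word(ch) = ch.isalnum() or ch == "_"
def pvIsWord (c : Char) : Bool := PySem.Chars.isalnum c || (c == '_')

-- left_ok at position i: i == 0 or not is_word(lower[i-1])  (the index is in range whenever it is read)
def pvOkL (l : List Char) (i : Nat) : Bool := decide (i = 0) || !pvIsWord (l.getD (i - 1) ' ')

-- right_ok at position i for a word of length n: i+n >= len(lower) or not is_word(lower[i+n])
def pvOkR (l : List Char) (i n : Nat) : Bool := decide (l.length ≤ i + n) || !pvIsWord (l.getD (i + n) ' ')

-- ===== PORT A =====
-- has_word's while loop: state s is the start passed to lower.find(word, s); the 'l.length < s'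
-- guard only makes the recursion total (Python's find returns -1 there, so the loop also stops).
def pvHasWordFrom (l word : List Char) (s : Nat) : Bool :=
  if hle : l.length < s then false
  else
    let pos := PySem.Chars.findFrom l word (s : Int) none
    if hpos : pos = -1 then false
    else
      let p := pos.toNat
      if pvOkL l p && pvOkR l p word.length then true
      else pvHasWordFrom l word (p + 1)
termination_by l.length + 1 - s
decreasing_by
  have hspec := (PySem.Chars.findFrom_natCast_spec l word s (by omega) hpos).1
  have : s ≤ pos.toNat := by omega
  omega

def text_has_stub_markers (text : String) : Bool :=
  let l := PySem.Chars.lower text.toList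
  pvHasWordFrom l "todo".toList 0 ||
  pvHasWordFrom l "stub".toList 0 ||
  pvHasWordFrom l "placeholder".toList 0 ||
  pvHasWordFrom l "fixme".toList 0 ||
  PySem.Chars.isIn "not yet implemented".toList l ||
  PySem.Chars.isIn "not implemented".toList l ||
  pvHasWordFrom l "unimplemented".toList 0 ||
  pvHasWordFrom l "notimplemented".toList 0

-- ===== PORT B =====
def pvMarkers : List (List Char) :=
  ["todo".toList, "stub".toList, "placeholder".toList, "fixme".toList,
   "unimplemented".toList, "notimplemented".toList]

-- lower.startswith(m, i) for 0 ≤ i < len(lower) is startswith on the dropped tail (exact there)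
def text_has_stub_markers_alt (text : String) : Bool :=
  let l := PySem.Chars.lower text.toList
  if PySem.Chars.isIn "not yet implemented".toList l ||
     PySem.Chars.isIn "not implemented".toList l then true
  else
    (List.range l.length).any (fun i =>
      if decide (0 < i) && pvIsWord (l.getD (i - 1) ' ') then false
      else pvMarkers.any (fun m =>
        PySem.Chars.startswith (l.drop i) m && pvOkR l i m.length))

-- ===== PRECONDITION & SPEC =====
def Spec_text_has_stub_markers (text : String) (out : Bool) : Prop := out = text_has_stub_markers_alt text
instance (text : String) (out : Bool) : Decidable (Spec_text_has_stub_markers text out) := by unfold Spec_text_has_stub_markers; infer_instance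

-- ===== CLAIM (what is proved, stated in full; the proofs are below) =====
def Claim_equal_text_has_stub_markers : Prop := ∀ (text : String), Dom_text_has_stub_markers text → Spec_text_has_stub_markers text (text_has_stub_markers text)

-- ===== LEMMAS AND PROOFS =====

-- the common specification both ports are reduced to: a whole-word occurrence of w in l
def pvOcc (l w : List Char) : Prop :=
  ∃ i, w <+: l.drop i ∧ pvOkL l i = true ∧ pvOkR l i w.length = true

lemma pvHasWordFrom_iff (l word : List Char) (hw : word ≠ []) (s : Nat) :
    pvHasWordFrom l word s = true ↔
      ∃ i, s ≤ i ∧ word <+: l.drop i ∧ pvOkL l i = true ∧ pvOkR l i word.length = true := by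
  fun_induction pvHasWordFrom l word s with
  | case1 s hle =>
      simp only [Bool.false_eq_true, false_iff]
      rintro ⟨i, hsi, hpre, -, -⟩
      have hd : l.drop i = [] := List.drop_eq_nil_iff.mpr (by omega)
      rw [hd] at hpre
      exact hw (List.prefix_nil.mp hpre)
  | case2 s hle pos hpos =>
      simp only [Bool.false_eq_true, false_iff]
      have hnot : ¬ word <:+: l.drop s :=
        (PySem.Chars.findFrom_natCast_eq_neg_one_iff l word s (by omega)).mp hpos
      rintro ⟨i, hsi, hpre, -, -⟩
      apply hnot
      have hd : l.drop i = (l.drop s).drop (i - s) := by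
        rw [List.drop_drop]; congr 1; omega
      rw [hd] at hpre
      exact hpre.isInfix.trans (List.drop_suffix _ _).isInfix
  | case3 s hle pos hne p hok =>
      simp only [true_iff]
      have hspec := PySem.Chars.findFrom_natCast_spec l word s (by omega) hne
      rcases Bool.and_eq_true_iff.mp hok with ⟨hL, hR⟩
      exact ⟨p, by omega, hspec.2.1, hL, hR⟩
  | case4 s hle pos hne p hok ih =>
      have hspec := PySem.Chars.findFrom_natCast_spec l word s (by omega) hne
      rw [ih]
      constructor
      · rintro ⟨i, hsi, h⟩
        exact ⟨i, by omega, h⟩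
      · rintro ⟨i, hsi, hpre, hL, hR⟩
        refine ⟨i, ?_, hpre, hL, hR⟩
        by_contra hlt
        push Not at hlt
        rcases Nat.lt_or_ge i pos.toNat with hip | hip
        · exact hspec.2.2 i (by omega) (by omega) hpre
        · have hieq : i = pos.toNat := by omega
          subst hieq
          rw [hL, hR] at hok
          simp at hok

lemma pvHasWord_iff_occ (l word : List Char) (hw : word ≠ []) :
    pvHasWordFrom l word 0 = true ↔ pvOcc l word := by
  rw [pvHasWordFrom_iff l word hw 0]
  simp only [pvOcc, Nat.zero_le, true_and]

lemma pvGuard_eq (l : List Char) (i : Nat) :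
    (decide (0 < i) && pvIsWord (l.getD (i - 1) ' ')) = !pvOkL l i := by
  by_cases h : i = 0 <;> simp [pvOkL, h, Nat.pos_iff_ne_zero]

lemma alt_scan_iff (l : List Char) (hw : ∀ m ∈ pvMarkers, m ≠ []) :
    ((List.range l.length).any (fun i =>
      if decide (0 < i) && pvIsWord (l.getD (i - 1) ' ') then false
      else pvMarkers.any (fun m =>
        PySem.Chars.startswith (l.drop i) m && pvOkR l i m.length)) = true) ↔
      ∃ m ∈ pvMarkers, pvOcc l m := by
  simp only [List.any_eq_true, List.mem_range, pvGuard_eq]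
  constructor
  · rintro ⟨i, hi, hf⟩
    rcases hokL : pvOkL l i with _ | _
    · rw [hokL] at hf; simp at hf
    · rw [hokL] at hf
      simp only [Bool.not_true, Bool.false_eq_true, if_false] at hf
      rcases List.any_eq_true.mp hf with ⟨m, hm, hmi⟩
      rcases Bool.and_eq_true_iff.mp hmi with ⟨hsw, hR⟩
      exact ⟨m, hm, i, (PySem.Chars.startswith_iff _ _).mp hsw, hokL, hR⟩
  · rintro ⟨m, hm, i, hpre, hL, hR⟩
    have hne : m ≠ [] := hw m hm
    have hi : i < l.length := by
      by_contra h
      have hd : l.drop i = [] := List.drop_eq_nil_iff.mpr (by omega)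
      rw [hd] at hpre
      exact hne (List.prefix_nil.mp hpre)
    refine ⟨i, hi, ?_⟩
    rw [hL]
    simp only [Bool.not_true, Bool.false_eq_true, if_false]
    exact List.any_eq_true.mpr ⟨m, hm, Bool.and_eq_true_iff.mpr
      ⟨(PySem.Chars.startswith_iff _ _).mpr hpre, hR⟩⟩

lemma exists_marker_occ (l : List Char) :
    (∃ m ∈ pvMarkers, pvOcc l m) ↔
      pvOcc l "todo".toList ∨ pvOcc l "stub".toList ∨ pvOcc l "placeholder".toList ∨
      pvOcc l "fixme".toList ∨ pvOcc l "unimplemented".toList ∨ pvOcc l "notimplemented".toList := by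
  simp [pvMarkers]

-- ===== VERDICT (by name: the statement is the Claim_ definition above) =====
theorem text_has_stub_markers_spec : Claim_equal_text_has_stub_markers := by
  intro text _
  unfold Spec_text_has_stub_markers text_has_stub_markers text_has_stub_markers_alt
  dsimp only
  rw [Bool.eq_iff_iff]
  set l := PySem.Chars.lower text.toList with hl
  by_cases hp : (PySem.Chars.isIn "not yet implemented".toList l ||
      PySem.Chars.isIn "not implemented".toList l) = true
  · rw [if_pos hp]
    simp only [Bool.or_eq_true] at hp ⊢
    exact ⟨fun _ => trivial, fun _ => by tauto⟩
  · rw [if_neg hp]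
    simp only [Bool.or_eq_true] at hp
    push Not at hp
    simp only [ne_eq, Bool.not_eq_true] at hp
    rw [alt_scan_iff l (by decide), exists_marker_occ]
    simp only [Bool.or_eq_true,
      pvHasWord_iff_occ l "todo".toList (by decide),
      pvHasWord_iff_occ l "stub".toList (by decide),
      pvHasWord_iff_occ l "placeholder".toList (by decide),
      pvHasWord_iff_occ l "fixme".toList (by decide),
      pvHasWord_iff_occ l "unimplemented".toList (by decide),
      pvHasWord_iff_occ l "notimplemented".toList (by decide),
      hp.1, hp.2, Bool.false_eq_true, or_false]
    tauto
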